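-- pv_equiv track=rewrite | github.com/pavlos-io/advent-of-code | 2021/day18/day18.py | will_split
-- ===== SOURCE A (Python) =====
-- def parse_int(line, idx):
--     start = idx
--     num = 0
--     while idx < len(line) and line[idx].isdigit():
--         num = num * 10 + int(line[idx])
--         idx += 1
--
--     return num, idx - start
--
-- def will_split(line):
--     idx = 0
--     while idx < len(line):
--         if line[idx].isdigit():
--             num, num_len = parse_int(line, idx)
--             idx += num_len
--             if num > 9:
--                 return True
--         idx += 1
--
--     return False
-- ===== SOURCE B (Python) =====
-- def will_split(line):
--     # A maximal digit run has value > 9 iff some nonzero digit is immediately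
--     # followed by another digit; scan adjacent pairs, no integer is ever built.
--     return any('1' <= a <= '9' and b.isdigit() for a, b in zip(line, line[1:]))
-- ===== Notes on version B (the rewrite author's own statement) =====
-- stated objective: simpler
-- what changed: Replaces the parse_int reconstruction of each number with a one-line adjacent-pair scan: a digit run exceeds 9 exactly when a nonzero digit is immediately followed by another digit, so no integer value is ever computed.
import Mathlib
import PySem

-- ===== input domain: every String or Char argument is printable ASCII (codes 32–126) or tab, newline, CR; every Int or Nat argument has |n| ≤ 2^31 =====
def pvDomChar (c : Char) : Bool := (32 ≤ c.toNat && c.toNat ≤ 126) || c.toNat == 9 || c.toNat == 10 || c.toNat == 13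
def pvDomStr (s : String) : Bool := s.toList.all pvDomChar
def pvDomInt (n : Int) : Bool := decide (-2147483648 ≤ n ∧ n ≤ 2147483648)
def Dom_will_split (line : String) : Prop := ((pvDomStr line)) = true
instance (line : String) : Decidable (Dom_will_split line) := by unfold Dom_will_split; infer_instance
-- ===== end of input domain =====

-- B replaces A's parse_int integer reconstruction with an adjacent-pair scan
-- ("nonzero digit followed by a digit"); objective: simpler.


-- ===== PORT A =====
-- the while loop of parse_int: while idx < len(line) and line[idx].isdigit():
--   num = num*10 + int(line[idx]); idx += 1
-- (int(line[idx]) on a single digit char is exactly toNat - 48)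
def parseIntGo (l : List Char) (idx : Nat) (num : Int) : Int × Nat :=
  if h : idx < l.length ∧ PySem.Chars.isdigit (l.getD idx ' ') then
    parseIntGo l (idx + 1) (num * 10 + ((l.getD idx ' ').toNat - 48 : Int))
  else (num, idx)
termination_by l.length - idx
decreasing_by omega

-- needed for will_split's termination: the loop's final index never moves left
theorem parseIntGo_le (l : List Char) (idx : Nat) (num : Int) :
    idx ≤ (parseIntGo l idx num).2 := by
  fun_induction parseIntGo l idx num with
  | case1 => omega
  | case2 => simp

-- the while loop of will_split; parse_int(line, idx) = (num, idx - start) is parseIntGo's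
-- (num, final idx), so idx += num_len lands exactly at parseIntGo's final index
def willSplitGo (l : List Char) (idx : Nat) : Bool :=
  if h : idx < l.length then
    if PySem.Chars.isdigit (l.getD idx ' ') then
      let p := parseIntGo l idx 0      -- num = p.1, idx + num_len = p.2
      if p.1 > 9 then true
      else willSplitGo l (p.2 + 1)     -- idx += num_len; idx += 1
    else willSplitGo l (idx + 1)
  else false
termination_by l.length - idx
decreasing_by
  · have := parseIntGo_le l idx 0; omega
  · omega

def will_split (line : String) : Bool := willSplitGo line.toList 0

-- ===== PORT B =====
-- any('1' <= a <= '9' and b.isdigit() for a, b in zip(line, line[1:]))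
def willSplitAltGo : List Char → Bool
  | c1 :: c2 :: rest =>
    if (decide ('1' ≤ c1) && decide (c1 ≤ '9')) && PySem.Chars.isdigit c2 then true
    else willSplitAltGo (c2 :: rest)
  | _ => false

def will_split_alt (line : String) : Bool := willSplitAltGo line.toList

-- ===== PRECONDITION & SPEC =====
def Spec_will_split (line : String) (out : Bool) : Prop := out = will_split_alt line
instance (line : String) (out : Bool) : Decidable (Spec_will_split line out) := by unfold Spec_will_split; infer_instance

-- ===== CLAIM (what is proved, stated in full; the proofs are below) =====
def Claim_equal_will_split : Prop := ∀ (line : String), Dom_will_split line → Spec_will_split line (will_split line)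

-- ===== LEMMAS AND PROOFS =====

theorem char_toNat_inj (c d : Char) : c.toNat = d.toNat ↔ c = d := eq_iff_eq_of_cmp_eq_cmp rfl

theorem char_le_iff (c d : Char) : c ≤ d ↔ c.toNat ≤ d.toNat := ge_iff_le

theorem isdigit_iff (c : Char) : PySem.Chars.isdigit c = true ↔ (48 ≤ c.toNat ∧ c.toNat ≤ 57) := by
  simp [PySem.Chars.isdigit, char_le_iff]

-- for a digit c, the pair condition's first half is exactly "c ≠ '0'"
theorem digit_cond (c : Char) (hc : PySem.Chars.isdigit c = true) :
    (decide ('1' ≤ c) && decide (c ≤ '9')) = (c != '0') := by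
  rw [isdigit_iff] at hc
  by_cases h0 : c = '0'
  · subst h0; decide
  · have h48 : c.toNat ≠ 48 := fun h => h0 ((char_toNat_inj c '0').mp h)
    have h1 : '1' ≤ c := (char_le_iff '1' c).mpr (show 49 ≤ c.toNat by omega)
    have h2 : c ≤ '9' := (char_le_iff c '9').mpr (show c.toNat ≤ 57 by omega)
    simp [h0, h1, h2]

theorem nondigit_cond (c : Char) (hc : PySem.Chars.isdigit c = false) :
    (decide ('1' ≤ c) && decide (c ≤ '9')) = false := by
  by_contra h
  simp only [Bool.and_eq_true, decide_eq_true_eq, Bool.not_eq_false] at h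
  rw [char_le_iff, char_le_iff] at h
  rw [show ('1':Char).toNat = 49 from rfl, show ('9':Char).toNat = 57 from rfl] at h
  have : PySem.Chars.isdigit c = true := (isdigit_iff c).mpr ⟨by omega, by omega⟩
  simp [this] at hc

-- a non-digit char never fires the pair condition; B's scan skips it
theorem altGo_skip (c : Char) (s : List Char) (hc : PySem.Chars.isdigit c = false) :
    willSplitAltGo (c :: s) = willSplitAltGo s := by
  cases s with
  | nil => simp [willSplitAltGo]
  | cons c2 s' => simp [willSplitAltGo, nondigit_cond c hc]

theorem dv_bounds (c : Char) (hc : PySem.Chars.isdigit c = true) :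
    (0 : Int) ≤ ((c.toNat : Int) - 48) ∧ ((c.toNat : Int) - 48) ≤ 9 := by
  rw [isdigit_iff] at hc; omega

-- the accumulating fold over digits grows at least geometrically
theorem foldl_ge (r : List Char) (a : Int) (ha : 0 ≤ a)
    (hd : ∀ c ∈ r, PySem.Chars.isdigit c = true) :
    a * 10 ^ r.length ≤ r.foldl (fun n c => n * 10 + ((c.toNat : Int) - 48)) a := by
  induction r generalizing a with
  | nil => simp
  | cons c r' ih =>
    have hc := dv_bounds c (hd c (by simp))
    have step : a * 10 ^ (c :: r').length ≤ (a * 10 + ((c.toNat : Int) - 48)) * 10 ^ r'.length := by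
      have he : a * 10 ^ (c :: r').length = (a * 10) * 10 ^ r'.length := by
        simp [List.length_cons, pow_succ]; ring
      rw [he]
      exact mul_le_mul_of_nonneg_right (by omega) (by positivity)
    calc a * 10 ^ (c :: r').length
        ≤ (a * 10 + ((c.toNat : Int) - 48)) * 10 ^ r'.length := step
      _ ≤ _ := by
          simpa [List.foldl] using ih (a * 10 + ((c.toNat : Int) - 48)) (by omega)
            (fun c hm => hd c (by simp [hm]))

-- value of a digit run exceeds 9 iff some digit before the last one is nonzero
theorem run_value (r : List Char) (hne : r ≠ [])
    (hd : ∀ c ∈ r, PySem.Chars.isdigit c = true) :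
    (r.foldl (fun n c => n * 10 + ((c.toNat : Int) - 48)) 0 > 9) ↔
      r.dropLast.any (· != '0') = true := by
  induction r with
  | nil => exact absurd rfl hne
  | cons c r' ih =>
    have hc := dv_bounds c (hd c (by simp))
    cases r' with
    | nil => simp [List.foldl]; omega
    | cons c2 r'' =>
      have hd' : ∀ x ∈ c2 :: r'', PySem.Chars.isdigit x = true := fun x hx => hd x (by simp [hx])
      have hstep : List.foldl (fun n c => n * 10 + ((c.toNat : Int) - 48)) 0 (c :: c2 :: r'')
          = List.foldl (fun n c => n * 10 + ((c.toNat : Int) - 48))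
              (0 * 10 + ((c.toNat : Int) - 48)) (c2 :: r'') := rfl
      rw [hstep, show ((0 : Int) * 10 + ((c.toNat : Int) - 48)) = ((c.toNat : Int) - 48) from by ring,
        show (c :: c2 :: r'').dropLast = c :: (c2 :: r'').dropLast from rfl, List.any_cons]
      by_cases h0 : c = '0'
      · subst h0
        rw [show ((('0' : Char).toNat : Int) - 48) = 0 from by decide, ih (by simp) hd']
        simp
      · have h48 : c.toNat ≠ 48 := fun h => h0 ((char_toNat_inj c '0').mp h)
        have hge := foldl_ge (c2 :: r'') ((c.toNat : Int) - 48) (by omega) hd'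
        have h10 : (10 : Int) ≤ 10 ^ (c2 :: r'').length := by
          calc (10 : Int) = 10 ^ 1 := by ring
            _ ≤ 10 ^ (c2 :: r'').length := by
                apply pow_le_pow_right₀ (by norm_num); simp
        have hval : (10 : Int) ≤
            (c2 :: r'').foldl (fun n c => n * 10 + ((c.toNat : Int) - 48)) ((c.toNat : Int) - 48) := by
          refine le_trans ?_ hge
          calc (10 : Int) ≤ 10 ^ (c2 :: r'').length := h10
            _ = 1 * 10 ^ (c2 :: r'').length := by ring
            _ ≤ ((c.toNat : Int) - 48) * 10 ^ (c2 :: r'').length :=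
                mul_le_mul_of_nonneg_right (by omega) (by positivity)
        constructor
        · intro _; simp [h0]
        · intro _; omega

-- B's scan through a maximal digit run, then past the one char A skips after it
theorem altGo_run (r s : List Char) (hne : r ≠ [])
    (hd : ∀ c ∈ r, PySem.Chars.isdigit c = true)
    (hs : ∀ c, s.head? = some c → PySem.Chars.isdigit c = false) :
    willSplitAltGo (r ++ s) = (r.dropLast.any (· != '0') || willSplitAltGo s.tail) := by
  induction r with
  | nil => exact absurd rfl hne
  | cons c r' ih =>
    cases r' with
    | nil =>
      cases s with
      | nil => simp [willSplitAltGo]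
      | cons c2 s' =>
        have hc2 : PySem.Chars.isdigit c2 = false := hs c2 rfl
        rw [show ([c] ++ c2 :: s') = c :: c2 :: s' from rfl,
          show willSplitAltGo (c :: c2 :: s') =
            (if (decide ('1' ≤ c) && decide (c ≤ '9')) && PySem.Chars.isdigit c2 then true
             else willSplitAltGo (c2 :: s')) from rfl,
          hc2, altGo_skip c2 s' hc2]
        simp
    | cons c2 r'' =>
      have hc : PySem.Chars.isdigit c = true := hd c (by simp)
      have hc2 : PySem.Chars.isdigit c2 = true := hd c2 (by simp)
      have hd' : ∀ x ∈ c2 :: r'', PySem.Chars.isdigit x = true := fun x hx => hd x (by simp [hx])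
      rw [show ((c :: c2 :: r'') ++ s) = c :: c2 :: (r'' ++ s) from rfl,
        show willSplitAltGo (c :: c2 :: (r'' ++ s)) =
          (if (decide ('1' ≤ c) && decide (c ≤ '9')) && PySem.Chars.isdigit c2 then true
           else willSplitAltGo (c2 :: (r'' ++ s))) from rfl,
        digit_cond c hc, hc2,
        show (c2 :: (r'' ++ s)) = ((c2 :: r'') ++ s) from rfl, ih (by simp) hd',
        show (c :: c2 :: r'').dropLast = c :: (c2 :: r'').dropLast from rfl, List.any_cons]
      by_cases h0 : c = '0'
      · subst h0; simp
      · simp [h0]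

-- parseIntGo folds over the digit prefix of l.drop idx and ends just past it
theorem parseIntGo_eq (l : List Char) (idx : Nat) (num : Int) :
    parseIntGo l idx num =
      (((l.drop idx).takeWhile PySem.Chars.isdigit).foldl
          (fun n c => n * 10 + ((c.toNat : Int) - 48)) num,
        idx + ((l.drop idx).takeWhile PySem.Chars.isdigit).length) := by
  fun_induction parseIntGo l idx num with
  | case1 idx num h ih =>
    obtain ⟨hlt, hdig⟩ := h
    have hg : l.getD idx ' ' = l[idx] := List.getD_eq_getElem l ' ' hlt
    have hdrop : l.drop idx = l[idx] :: l.drop (idx + 1) := List.drop_eq_getElem_cons hlt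
    rw [hg] at hdig
    rw [ih, hdrop, List.takeWhile_cons_of_pos hdig, hg]
    simp [List.foldl]
    omega
  | case2 idx num h =>
    by_cases hlt : idx < l.length
    · have hg : l.getD idx ' ' = l[idx] := List.getD_eq_getElem l ' ' hlt
      have hdig : PySem.Chars.isdigit l[idx] = false := by
        rw [← hg]
        cases hEq : PySem.Chars.isdigit (l.getD idx ' ') with
        | true => exact absurd ⟨hlt, hEq⟩ h
        | false => rfl
      have hdrop : l.drop idx = l[idx] :: l.drop (idx + 1) := List.drop_eq_getElem_cons hlt
      rw [hdrop, List.takeWhile_cons_of_neg (by simp [hdig])]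
      simp
    · have hnil : l.drop idx = [] := List.drop_eq_nil_of_le (by omega)
      simp [hnil]

-- the head of dropWhile never satisfies the predicate
theorem head_dropWhile (p : Char → Bool) (l : List Char) (c : Char)
    (h : (l.dropWhile p).head? = some c) : p c = false := by
  induction l with
  | nil => simp [List.dropWhile] at h
  | cons x xs ih =>
    by_cases hx : p x = true
    · rw [List.dropWhile_cons_of_pos hx] at h; exact ih h
    · rw [List.dropWhile_cons_of_neg hx] at h
      simp only [List.head?_cons, Option.some.injEq] at h
      rw [← h]; simpa using hx

-- main invariant: A's loop from idx equals B's scan of the remaining suffix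
theorem main_inv (l : List Char) (idx : Nat) :
    willSplitGo l idx = willSplitAltGo (l.drop idx) := by
  fun_induction willSplitGo l idx with
  | case1 idx hlt hdig p hgt =>
    -- digit branch, num > 9: B must also return true
    have hg : l.getD idx ' ' = l[idx] := List.getD_eq_getElem l ' ' hlt
    rw [hg] at hdig
    set r := (l.drop idx).takeWhile PySem.Chars.isdigit with hr
    set s := (l.drop idx).dropWhile PySem.Chars.isdigit with hsdef
    have hsplit : l.drop idx = r ++ s := (List.takeWhile_append_dropWhile).symm
    have hdrop : l.drop idx = l[idx] :: l.drop (idx + 1) := List.drop_eq_getElem_cons hlt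
    have hrne : r ≠ [] := by
      rw [hr, hdrop, List.takeWhile_cons_of_pos hdig]; simp
    have hrd : ∀ c ∈ r, PySem.Chars.isdigit c = true := fun c hc => List.mem_takeWhile_imp hc
    have hsh : ∀ c, s.head? = some c → PySem.Chars.isdigit c = false := fun c hc =>
      head_dropWhile _ _ _ hc
    have hp := parseIntGo_eq l idx 0
    rw [hsplit, altGo_run r s hrne hrd hsh]
    have hfire : r.dropLast.any (· != '0') = true := by
      rw [← run_value r hrne hrd]
      have : p.1 = r.foldl (fun n c => n * 10 + ((c.toNat : Int) - 48)) 0 := by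
        show (parseIntGo l idx 0).1 = _
        rw [hp]
      rw [← this]; exact hgt
    rw [hfire]; simp
  | case2 idx hlt hdig p hle ih =>
    -- digit branch, num ≤ 9: skip the run and the char after it
    have hg : l.getD idx ' ' = l[idx] := List.getD_eq_getElem l ' ' hlt
    rw [hg] at hdig
    set r := (l.drop idx).takeWhile PySem.Chars.isdigit with hr
    set s := (l.drop idx).dropWhile PySem.Chars.isdigit with hsdef
    have hsplit : l.drop idx = r ++ s := (List.takeWhile_append_dropWhile).symm
    have hdrop : l.drop idx = l[idx] :: l.drop (idx + 1) := List.drop_eq_getElem_cons hlt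
    have hrne : r ≠ [] := by
      rw [hr, hdrop, List.takeWhile_cons_of_pos hdig]; simp
    have hrd : ∀ c ∈ r, PySem.Chars.isdigit c = true := fun c hc => List.mem_takeWhile_imp hc
    have hsh : ∀ c, s.head? = some c → PySem.Chars.isdigit c = false := fun c hc =>
      head_dropWhile _ _ _ hc
    have hp := parseIntGo_eq l idx 0
    have hp1 : p.1 = r.foldl (fun n c => n * 10 + ((c.toNat : Int) - 48)) 0 := by
      show (parseIntGo l idx 0).1 = _; rw [hp]
    have hp2 : p.2 = idx + r.length := by
      show (parseIntGo l idx 0).2 = _; rw [hp]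
    have hfire : r.dropLast.any (· != '0') = false := by
      cases hEq : r.dropLast.any (· != '0') with
      | false => rfl
      | true => exact absurd ((run_value r hrne hrd).mpr hEq) (by rw [← hp1] at *; omega)
    have h1 : l.drop (idx + r.length) = s := by
      calc l.drop (idx + r.length) = (l.drop idx).drop r.length := by
            rw [List.drop_drop]
        _ = (r ++ s).drop r.length := by rw [hsplit]
        _ = s := List.drop_left
    have hstail : l.drop (p.2 + 1) = s.tail := by
      rw [hp2]
      calc l.drop (idx + r.length + 1) = (l.drop (idx + r.length)).drop 1 := by
            rw [List.drop_drop]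
        _ = s.drop 1 := by rw [h1]
        _ = s.tail := List.drop_one
    rw [ih, hstail, hsplit, altGo_run r s hrne hrd hsh, hfire]
    simp
  | case3 idx hlt hdig ih =>
    have hg : l.getD idx ' ' = l[idx] := List.getD_eq_getElem l ' ' hlt
    rw [hg] at hdig
    have hdrop : l.drop idx = l[idx] :: l.drop (idx + 1) := List.drop_eq_getElem_cons hlt
    rw [ih, hdrop, altGo_skip _ _ (by simpa using hdig)]
  | case4 idx hlt =>
    have hnil : l.drop idx = [] := List.drop_eq_nil_of_le (by omega)
    simp [hnil, willSplitAltGo]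

-- ===== VERDICT (by name: the statement is the Claim_ definition above) =====
theorem will_split_spec : Claim_equal_will_split := by
  intro line _
  unfold Spec_will_split will_split will_split_alt
  simpa using main_inv line.toList 0
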